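-- pv_equiv track=rewrite | github.com/usnistgov/MediScore | lib/video_masks.py | subdivide_bitplanes
-- ===== SOURCE A (Python) =====
-- def subdivide_bitplanes(bp_list,dividing_value = 8):
--     """
--     * Description: subdivide into a list of list of BitPlane's. Each list is also shifted back appropriately.
--     """
--     n_layer = (max(bp_list) - 1)//dividing_value + 1
--     bp_l_list = []
--     for l in range(n_layer):
--         offset = dividing_value*l
--         bp_l = [ b - offset for b in bp_list if ((b >= offset) and (b < offset + dividing_value)) ]
--         bp_l_list.append(bp_l)
--     return bp_l_list
-- ===== SOURCE B (Python) =====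
-- def subdivide_bitplanes(bp_list, dividing_value=8):
--     """Single pass: bucket each value into layer b // dividing_value, shifted by b % dividing_value."""
--     n_layer = (max(bp_list) - 1)//dividing_value + 1
--     if n_layer <= 0:
--         return []
--     buckets = [[] for _ in range(n_layer)]
--     top = n_layer * dividing_value
--     for b in bp_list:
--         if 0 <= b < top:
--             buckets[b // dividing_value].append(b % dividing_value)
--     return buckets
-- ===== Notes on version B (the rewrite author's own statement) =====
-- stated objective: faster
-- what changed: Replaces A's per-layer rescan of the whole list (one filter pass per layer) by a single pass that buckets each value into layer b // dividing_value with shift b % dividing_value.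
import Mathlib
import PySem

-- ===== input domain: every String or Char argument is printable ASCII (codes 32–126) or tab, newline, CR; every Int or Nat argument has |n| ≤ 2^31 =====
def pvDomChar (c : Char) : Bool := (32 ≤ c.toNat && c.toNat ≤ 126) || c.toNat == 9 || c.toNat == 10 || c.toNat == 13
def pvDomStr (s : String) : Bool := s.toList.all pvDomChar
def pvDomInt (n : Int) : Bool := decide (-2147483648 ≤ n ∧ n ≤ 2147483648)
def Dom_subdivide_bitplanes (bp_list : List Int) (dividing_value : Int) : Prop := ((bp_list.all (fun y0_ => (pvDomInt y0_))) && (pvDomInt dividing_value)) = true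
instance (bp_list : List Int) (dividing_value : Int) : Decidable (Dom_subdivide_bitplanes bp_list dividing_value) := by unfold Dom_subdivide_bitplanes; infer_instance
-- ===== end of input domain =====

-- B replaces A's per-layer rescan of the whole list by a single pass that buckets each
-- value into layer b // dividing_value (objective: faster, one pass instead of n_layer passes).

-- ===== PORT A =====
def subdivide_bitplanes (bp_list : List Int) (dividing_value : Int) : List (List Int) :=
  match PySem.List.max? bp_list id with
  | none => []  -- max([]) raises ValueError: excluded by Pre_
  | some mx =>
    let n_layer := PySem.Int.floordiv (mx - 1) dividing_value + 1
    (PySem.List.pyRange 0 n_layer 1).foldl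
      (fun bp_l_list l =>
        let offset := dividing_value * l
        let bp_l := bp_list.filterMap (fun b =>
          if offset ≤ b ∧ b < offset + dividing_value then some (b - offset) else none)
        bp_l_list ++ [bp_l]) []

-- ===== PORT B =====
def subdivide_bitplanes_alt (bp_list : List Int) (dividing_value : Int) : List (List Int) :=
  match PySem.List.max? bp_list id with
  | none => []  -- max([]) raises ValueError: excluded by Pre_
  | some mx =>
    let n_layer := PySem.Int.floordiv (mx - 1) dividing_value + 1
    if n_layer ≤ 0 then []
    else
      let buckets : List (List Int) := (PySem.List.pyRange 0 n_layer 1).map (fun _ => [])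
      let top := n_layer * dividing_value
      -- under the guard 0 ≤ b < top (with n_layer > 0) the index b // dividing_value is
      -- nonnegative and < n_layer, so .toNat and List.modify are exact for buckets[...].append
      bp_list.foldl
        (fun bs b =>
          if 0 ≤ b ∧ b < top then
            bs.modify (PySem.Int.floordiv b dividing_value).toNat
              (fun l => l ++ [PySem.Int.mod b dividing_value])
          else bs) buckets

-- ===== PRECONDITION & SPEC =====
-- Pre_ excludes exactly the inputs where A raises: max([]) (ValueError) and dividing_value = 0 (ZeroDivisionError).
def Pre_subdivide_bitplanes (bp_list : List Int) (dividing_value : Int) : Prop :=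
  bp_list ≠ [] ∧ dividing_value ≠ 0
instance (bp_list : List Int) (dividing_value : Int) : Decidable (Pre_subdivide_bitplanes bp_list dividing_value) := by unfold Pre_subdivide_bitplanes; infer_instance

def pvWitness_subdivide_bitplanes : List Int × Int := ([1, 2, 9, 17], 8)

def Spec_subdivide_bitplanes (bp_list : List Int) (dividing_value : Int) (out : List (List Int)) : Prop := out = subdivide_bitplanes_alt bp_list dividing_value
instance (bp_list : List Int) (dividing_value : Int) (out : List (List Int)) : Decidable (Spec_subdivide_bitplanes bp_list dividing_value out) := by unfold Spec_subdivide_bitplanes; infer_instance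

-- ===== CLAIM (what is proved, stated in full; the proofs are below) =====
def Claim_equal_subdivide_bitplanes : Prop := ∀ (bp_list : List Int) (dividing_value : Int), Dom_subdivide_bitplanes bp_list dividing_value → Pre_subdivide_bitplanes bp_list dividing_value → Spec_subdivide_bitplanes bp_list dividing_value (subdivide_bitplanes bp_list dividing_value)

-- ===== LEMMAS AND PROOFS =====

-- A's loop: appending one layer per iteration is mapping the layer function over the range.
theorem pv_foldl_append_map {α β : Type} (g : α → β) :
    ∀ (xs : List α) (init : List β),
      xs.foldl (fun acc l => acc ++ [g l]) init = init ++ xs.map g := by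
  intro xs
  induction xs with
  | nil => intro init; simp
  | cons x xs ih => intro init; simp [ih]

-- B's loop does nothing when the admission window is empty.
theorem pv_bfold_nonpos (d top : Int) (h : top ≤ 0) :
    ∀ (xs : List Int) (bs : List (List Int)),
      xs.foldl
        (fun bs b =>
          if 0 ≤ b ∧ b < top then
            bs.modify (PySem.Int.floordiv b d).toNat
              (fun l => l ++ [PySem.Int.mod b d])
          else bs) bs = bs := by
  intro xs
  induction xs with
  | nil => intro bs; simp
  | cons x xs ih =>
    intro bs
    have hx : ¬ (0 ≤ x ∧ x < top) := by omega
    simp [hx, ih]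

-- Elementwise characterisation of B's bucketing pass (d > 0).
theorem pv_bfold_getElem? (d top : Int) (hd : 0 < d) :
    ∀ (xs : List Int) (bs : List (List Int)) (i : Nat),
      (xs.foldl
        (fun bs b =>
          if 0 ≤ b ∧ b < top then
            bs.modify (PySem.Int.floordiv b d).toNat
              (fun l => l ++ [PySem.Int.mod b d])
          else bs) bs)[i]?
      = bs[i]?.map (fun l => l ++ xs.filterMap (fun b =>
          if 0 ≤ b ∧ b < top ∧ PySem.Int.floordiv b d = (i : Int)
          then some (PySem.Int.mod b d) else none)) := by
  intro xs
  induction xs with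
  | nil =>
    intro bs i
    simp
  | cons b xs ih =>
    intro bs i
    by_cases hb : 0 ≤ b ∧ b < top
    · have hq0 : 0 ≤ PySem.Int.floordiv b d := by
        rw [PySem.Int.floordiv_eq_ediv_of_pos hd]
        exact Int.ediv_nonneg hb.1 (le_of_lt hd)
      simp only [List.foldl_cons, if_pos hb, ih, List.getElem?_modify]
      by_cases hi : (PySem.Int.floordiv b d).toNat = i
      · have hqi : PySem.Int.floordiv b d = (i : Int) := by omega
        have hcond : 0 ≤ b ∧ b < top ∧ PySem.Int.floordiv b d = (i : Int) := ⟨hb.1, hb.2, hqi⟩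
        simp only [List.filterMap_cons, if_pos hcond, hi]
        cases bs[i]? <;> simp
      · have hqi : ¬ (PySem.Int.floordiv b d = (i : Int)) := by omega
        have hcond : ¬ (0 ≤ b ∧ b < top ∧ PySem.Int.floordiv b d = (i : Int)) := by
          intro h; exact hqi h.2.2
        simp only [List.filterMap_cons, if_neg hcond, hi]
        cases bs[i]? <;> simp
    · have hcond : ¬ (0 ≤ b ∧ b < top ∧ PySem.Int.floordiv b d = (i : Int)) := by
        intro h; exact hb ⟨h.1, h.2.1⟩
      simp only [List.foldl_cons, if_neg hb, ih, List.filterMap_cons, if_neg hcond]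

-- The two per-element tests agree layer by layer (d > 0, layer i < n).
theorem pv_layer_filter_eq (d n : Int) (hd : 0 < d) (i : Nat) (hi : (i : Int) < n)
    (bp_list : List Int) :
    bp_list.filterMap (fun b =>
        if d * (i : Int) ≤ b ∧ b < d * (i : Int) + d then some (b - d * (i : Int)) else none)
    = bp_list.filterMap (fun b =>
        if 0 ≤ b ∧ b < n * d ∧ PySem.Int.floordiv b d = (i : Int)
        then some (PySem.Int.mod b d) else none) := by
  apply List.filterMap_congr
  intro b _
  have hiff : (d * (i : Int) ≤ b ∧ b < d * (i : Int) + d)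
      ↔ (0 ≤ b ∧ b < n * d ∧ PySem.Int.floordiv b d = (i : Int)) := by
    constructor
    · rintro ⟨h1, h2⟩
      have h0 : (0 : Int) ≤ d * (i : Int) := mul_nonneg (le_of_lt hd) (by positivity)
      have hlt : ((i : Int) + 1) * d ≤ n * d :=
        mul_le_mul_of_nonneg_right (by omega) (le_of_lt hd)
      refine ⟨by omega, by nlinarith, ?_⟩
      rw [PySem.Int.floordiv_eq_iff_of_pos hd]
      constructor <;> nlinarith
    · rintro ⟨h0, htop, hq⟩
      rw [PySem.Int.floordiv_eq_iff_of_pos hd] at hq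
      constructor <;> nlinarith [hq.1, hq.2]
  by_cases h : d * (i : Int) ≤ b ∧ b < d * (i : Int) + d
  · have h' := hiff.mp h
    rw [if_pos h, if_pos h']
    have hmod := PySem.Int.floordiv_mul_add_mod b d
    rw [h'.2.2] at hmod
    have hcomm : d * (i : Int) = (i : Int) * d := mul_comm _ _
    congr 1
    omega
  · rw [if_neg h, if_neg (fun h' => h (hiff.mpr h'))]

theorem subdivide_bitplanes_eq (bp_list : List Int) (dividing_value : Int)
    (hpre : Pre_subdivide_bitplanes bp_list dividing_value) :
    subdivide_bitplanes bp_list dividing_value = subdivide_bitplanes_alt bp_list dividing_value := by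
  obtain ⟨hne, hd0⟩ := hpre
  unfold subdivide_bitplanes subdivide_bitplanes_alt
  cases hm : PySem.List.max? bp_list id with
  | none => rfl
  | some mx =>
    simp only []
    set d := dividing_value with hd
    set n := PySem.Int.floordiv (mx - 1) d + 1 with hn
    rw [pv_foldl_append_map]
    by_cases hnpos : n ≤ 0
    · rw [if_pos hnpos, PySem.List.pyRange_one_eq_nil (by omega)]
      simp
    · rw [if_neg hnpos]
      replace hnpos : 0 < n := by omega
      rcases lt_or_gt_of_ne hd0 with hdneg | hdpos
    -- d < 0: every layer window is empty, and B's admission window [0, n*d) is empty too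
      · have htop : n * d ≤ 0 := le_of_lt (mul_neg_of_pos_of_neg hnpos hdneg)
        rw [pv_bfold_nonpos d (n * d) htop]
        simp only [List.nil_append]
        apply List.map_congr_left
        intro l _
        rw [List.filterMap_eq_nil_iff]
        intro b _
        have : ¬ (d * l ≤ b ∧ b < d * l + d) := by
          rintro ⟨h1, h2⟩; linarith
        simp [this]
      -- d > 0: compare the two lists element by element
      · apply List.ext_getElem?
        intro i
        rw [pv_bfold_getElem? d (n * d) hdpos]
        have hncast : n = ((n.toNat : Nat) : Int) := by omega
        by_cases hi : i < n.toNat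
        · rw [List.nil_append, hncast,
            PySem.List.getElem?_map_pyRange_zero (fun _ => ([] : List Int)) n.toNat i hi,
            PySem.List.getElem?_map_pyRange_zero _ n.toNat i hi]
          simp only [Option.map_some, List.nil_append]
          congr 1
          exact pv_layer_filter_eq d ((n.toNat : Nat) : Int) hdpos i (by omega) bp_list
        · have hlen1 : ((PySem.List.pyRange 0 n 1).map (fun l =>
              bp_list.filterMap (fun b =>
                if d * l ≤ b ∧ b < d * l + d then some (b - d * l) else none))).length = n.toNat := by
            rw [List.length_map, PySem.List.length_pyRange_one]; omega
          have hlen2 : ((PySem.List.pyRange 0 n 1).map (fun _ => ([] : List Int))).length = n.toNat := by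
            rw [List.length_map, PySem.List.length_pyRange_one]; omega
          rw [List.nil_append, List.getElem?_eq_none (by omega), List.getElem?_eq_none (by omega)]
          simp

-- ===== VERDICT (by name: the statement is the Claim_ definition above) =====
theorem subdivide_bitplanes_spec : Claim_equal_subdivide_bitplanes := by
  intro bp_list dividing_value _ hpre
  unfold Spec_subdivide_bitplanes
  exact subdivide_bitplanes_eq bp_list dividing_value hpre
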